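-- pv_equiv track=rewrite | github.com/QuicksortRx/universal-med-ids | qumi-codes.py | encode_custom_alphanumeric
-- ===== SOURCE A (Python) =====
-- def encode_custom_alphanumeric(gcp_hex):
--     pc_alphabet_purged = '0123456789abcdefghjkmnpqrstvwxyz'
--     pc_al_rem_len = len(pc_alphabet_purged)
--     gcp_int = int(gcp_hex, 16)
--     result = ''
--     while gcp_int:
--         result = pc_alphabet_purged[gcp_int % pc_al_rem_len] + result
--         gcp_int = gcp_int // pc_al_rem_len
--     if not result:
--         result = pc_alphabet_purged[0]
--     return result[:7]
-- ===== SOURCE B (Python) =====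
-- def encode_custom_alphanumeric(gcp_hex):
--     alphabet = '0123456789abcdefghjkmnpqrstvwxyz'
--     n = int(gcp_hex, 16)
--     if n == 0:
--         return '0'
--     bits = format(n, 'b')
--     bits = '0' * (-len(bits) % 5) + bits
--     out = ''.join(alphabet[int(bits[i:i + 5], 2)] for i in range(0, len(bits), 5))
--     return out[:7]
-- ===== Notes on version B (the rewrite author's own statement) =====
-- stated objective: faster
-- what changed: Instead of A's repeated big-int divmod loop that peels off every base-32 digit and prepends to a string, B performs a local radix re-chunking: it takes the binary digit string of the integer (linear time), left-pads it to a multiple of 5 bits, maps each 5-bit group directly to one alphabet character, and truncates to 7.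
import Mathlib
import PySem

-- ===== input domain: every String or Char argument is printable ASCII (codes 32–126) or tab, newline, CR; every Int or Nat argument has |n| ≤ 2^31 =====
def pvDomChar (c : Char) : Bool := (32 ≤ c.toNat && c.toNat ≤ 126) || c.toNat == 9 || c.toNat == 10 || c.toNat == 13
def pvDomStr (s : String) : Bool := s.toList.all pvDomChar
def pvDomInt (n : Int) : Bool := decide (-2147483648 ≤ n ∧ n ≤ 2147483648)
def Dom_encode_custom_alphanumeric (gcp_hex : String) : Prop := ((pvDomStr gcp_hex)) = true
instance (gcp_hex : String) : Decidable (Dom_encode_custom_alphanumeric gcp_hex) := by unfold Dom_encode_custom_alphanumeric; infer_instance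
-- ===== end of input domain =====

-- B replaces A's repeated big-int divmod loop by a local radix re-chunking of the binary string
-- (5-bit groups map directly to alphabet characters); objective: faster (asymptotic).

-- ===== PORT A =====
def pvAlpha : List Char := "0123456789abcdefghjkmnpqrstvwxyz".toList

-- the 'while gcp_int:' loop; guard written as 0 < n: for negative n Python's loop never
-- terminates (n // 32 stays -1), and Pre_ excludes those inputs
def pvLoopA (n : Int) (result : List Char) : List Char :=
  if _h : 0 < n then
    pvLoopA (PySem.Int.floordiv n 32) (PySem.List.pyGetD pvAlpha (PySem.Int.mod n 32) '0' :: result)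
  else result
termination_by n.toNat
decreasing_by
  rw [PySem.Int.floordiv_eq_ediv_of_pos (by norm_num)]
  omega

def encode_custom_alphanumeric (gcp_hex : String) : String :=
  match PySem.Int.ofStrBase? gcp_hex 16 with
  | none => ""   -- int(gcp_hex, 16) raises ValueError; excluded by Pre_
  | some gcp_int =>
    let result := pvLoopA gcp_int []
    let result := if result = [] then ['0'] else result
    String.ofList (PySem.List.slice result none (some 7))

-- ===== PORT B =====
-- int(chunk, 2) for a chunk of '0'/'1' characters (exact there; B only feeds it such chunks)
def pvBit (c : Char) : Nat := if c = '1' then 1 else 0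
def pvVal2 (l : List Char) : Nat := l.foldl (fun a c => 2 * a + pvBit c) 0

-- Python's binary string formatting of n, for n > 0: the binary digits of n, most significant first
def pvBits (n : Nat) : List Char := (Nat.digits 2 n).reverse.map Nat.digitChar

-- the ''.join(alphabet[int(bits[i:i+5], 2)] for i in range(0, len(bits), 5)) comprehension;
-- alphabet[v] for 0 ≤ v < 32 is List.getD (exact there)
def pvChunks (l : List Char) : List Char :=
  if _h : l = [] then []
  else pvAlpha.getD (pvVal2 (l.take 5)) '0' :: pvChunks (l.drop 5)
termination_by l.length
decreasing_by
  have : 0 < l.length := List.length_pos_of_ne_nil _h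
  simp [List.length_drop]
  omega

def encode_custom_alphanumeric_alt (gcp_hex : String) : String :=
  match PySem.Int.ofStrBase? gcp_hex 16 with
  | none => ""
  | some n =>
    if n = 0 then "0"
    else
      let bits := pvBits n.toNat
      -- left-pad with '0' to a multiple of 5
      let bits := List.replicate ((5 - bits.length % 5) % 5) '0' ++ bits
      String.ofList ((pvChunks bits).take 7)

-- ===== PRECONDITION & SPEC =====
-- Pre_ excludes exactly the strings int(s, 16) rejects (A raises ValueError) and those denoting a
-- negative integer (A's while-loop never terminates there, since gcp_int // 32 stabilises at -1).
def Pre_encode_custom_alphanumeric (gcp_hex : String) : Prop :=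
  0 ≤ (PySem.Int.ofStrBase? gcp_hex 16).getD (-1)
instance (gcp_hex : String) : Decidable (Pre_encode_custom_alphanumeric gcp_hex) := by
  unfold Pre_encode_custom_alphanumeric; infer_instance

def pvWitness_encode_custom_alphanumeric : String := "1a"

def Spec_encode_custom_alphanumeric (gcp_hex : String) (out : String) : Prop := out = encode_custom_alphanumeric_alt gcp_hex
instance (gcp_hex : String) (out : String) : Decidable (Spec_encode_custom_alphanumeric gcp_hex out) := by unfold Spec_encode_custom_alphanumeric; infer_instance

-- ===== CLAIM =====
def Claim_equal_encode_custom_alphanumeric : Prop := ∀ (gcp_hex : String), Dom_encode_custom_alphanumeric gcp_hex → Pre_encode_custom_alphanumeric gcp_hex → Spec_encode_custom_alphanumeric gcp_hex (encode_custom_alphanumeric gcp_hex)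

-- ===== LEMMAS AND PROOFS =====

-- the base-32 representation of a natural number, most significant digit first
def pvRepr (n : Nat) : List Char :=
  if _h : n = 0 then [] else pvRepr (n / 32) ++ [pvAlpha.getD (n % 32) '0']
decreasing_by omega

theorem pvRepr_pos (n : Nat) (h : n ≠ 0) :
    pvRepr n = pvRepr (n / 32) ++ [pvAlpha.getD (n % 32) '0'] := by
  rw [pvRepr]; simp [h]

theorem pvRepr_ne_nil (n : Nat) (h : n ≠ 0) : pvRepr n ≠ [] := by
  rw [pvRepr_pos n h]; simp

-- A's loop builds pvRepr
theorem pvLoopA_eq (n : Nat) : ∀ acc, pvLoopA (n : Int) acc = pvRepr n ++ acc := by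
  induction n using Nat.strong_induction_on with
  | _ n ih =>
    intro acc
    rw [pvLoopA]
    by_cases h : n = 0
    · subst h; simp [pvRepr]
    · have hpos : (0:Int) < (n:Int) := by exact_mod_cast Nat.pos_of_ne_zero h
      simp only [hpos, dite_true]
      have hfd : PySem.Int.floordiv (n:Int) 32 = ((n / 32 : Nat) : Int) := by
        exact_mod_cast PySem.Int.floordiv_natCast n 32
      have hmd : PySem.Int.mod (n:Int) 32 = ((n % 32 : Nat) : Int) := by
        exact_mod_cast PySem.Int.mod_natCast n 32
      rw [hfd, hmd, PySem.List.pyGetD_natCast, ih (n / 32) (by omega)]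
      rw [pvRepr_pos n h, List.append_assoc]
      rfl

-- pvDigitsLow k n: the k low base-32 digits of n, least significant first
def pvDigitsLow (k n : Nat) : List Char :=
  match k with
  | 0 => []
  | k + 1 => pvAlpha.getD (n % 32) '0' :: pvDigitsLow k (n / 32)

-- for a number with exactly k+1 base-32 digits, the reversed low digits are pvRepr
theorem pvDigitsLow_reverse (k : Nat) : ∀ n : Nat, 0 < n → 32 ^ k ≤ n → n < 32 ^ (k + 1) →
    (pvDigitsLow (k + 1) n).reverse = pvRepr n := by
  induction k with
  | zero =>
    intro n h0 _ hlt
    have hd : n / 32 = 0 := by omega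
    rw [pvRepr_pos n (by omega)]
    simp [pvDigitsLow, hd, pvRepr]
  | succ k ih =>
    intro n h0 hle hlt
    have h1 : 32 ^ k ≤ n / 32 := by
      rw [Nat.le_div_iff_mul_le (by norm_num)]
      calc 32 ^ k * 32 = 32 ^ (k + 1) := by ring
        _ ≤ n := hle
    have h2 : n / 32 < 32 ^ (k + 1) := by
      rw [Nat.div_lt_iff_lt_mul (by norm_num)]
      calc n < 32 ^ (k + 1 + 1) := hlt
        _ = 32 ^ (k + 1) * 32 := by ring
    have h3 : 0 < n / 32 := lt_of_lt_of_le (Nat.pow_pos (by norm_num)) h1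
    rw [pvRepr_pos n (by omega)]
    show (pvAlpha.getD (n % 32) '0' :: pvDigitsLow (k + 1) (n / 32)).reverse = _
    rw [List.reverse_cons, ih (n / 32) h3 h1 h2]

-- pvVal2 with a running accumulator
theorem pvVal2_foldl (l : List Char) : ∀ i : Nat,
    l.foldl (fun a c => 2 * a + pvBit c) i = i * 2 ^ l.length + pvVal2 l := by
  induction l with
  | nil => intro i; simp [pvVal2]
  | cons c t ih =>
    intro i
    show t.foldl _ (2 * i + pvBit c) = _
    rw [ih (2 * i + pvBit c)]
    have : pvVal2 (c :: t) = (2 * 0 + pvBit c) * 2 ^ t.length + pvVal2 t := by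
      show t.foldl _ (2 * 0 + pvBit c) = _
      rw [ih (2 * 0 + pvBit c)]
    rw [this]
    simp [List.length_cons, pow_succ]
    ring

theorem pvVal2_append (a b : List Char) :
    pvVal2 (a ++ b) = pvVal2 a * 2 ^ b.length + pvVal2 b := by
  unfold pvVal2
  rw [List.foldl_append, pvVal2_foldl]
  rfl

theorem pvVal2_lt (l : List Char) : pvVal2 l < 2 ^ l.length := by
  induction l with
  | nil => simp [pvVal2]
  | cons c t ih =>
    have : pvVal2 (c :: t) = (2 * 0 + pvBit c) * 2 ^ t.length + pvVal2 t := by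
      show t.foldl _ (2 * 0 + pvBit c) = _
      rw [pvVal2_foldl]
    rw [this]
    have hb : pvBit c ≤ 1 := by unfold pvBit; split <;> omega
    have h2 : (0:Nat) < 2 ^ t.length := Nat.pow_pos (by norm_num)
    calc (2 * 0 + pvBit c) * 2 ^ t.length + pvVal2 t
        ≤ 1 * 2 ^ t.length + pvVal2 t := by
          have := Nat.mul_le_mul_right (2 ^ t.length) (show 2 * 0 + pvBit c ≤ 1 by omega)
          omega
      _ < 2 ^ (c :: t).length := by
          simp [List.length_cons, pow_succ]; omega

theorem pvVal2_replicate_zero (k : Nat) : pvVal2 (List.replicate k '0') = 0 := by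
  induction k with
  | zero => rfl
  | succ k ih =>
    rw [List.replicate_succ']
    rw [pvVal2_append, ih]
    simp [pvVal2, List.foldl, pvBit]

-- the value of the binary string of l read back equals ofDigits
theorem pvVal2_revmap (l : List Nat) (h : ∀ d ∈ l, d < 2) :
    pvVal2 (l.reverse.map Nat.digitChar) = Nat.ofDigits 2 l := by
  induction l with
  | nil => simp [pvVal2]
  | cons d t ih =>
    have hd : d < 2 := h d (by simp)
    have ht : ∀ x ∈ t, x < 2 := fun x hx => h x (by simp [hx])
    rw [List.reverse_cons, List.map_append, pvVal2_append, ih ht]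
    have hbit : pvVal2 ([d].map Nat.digitChar) = d := by
      interval_cases d <;> decide
    simp only [List.length_map, List.length_singleton, hbit, Nat.ofDigits_cons]
    push_cast
    ring

theorem pvBits_val (n : Nat) : pvVal2 (pvBits n) = n := by
  unfold pvBits
  rw [pvVal2_revmap _ (fun d hd => Nat.digits_lt_base (by norm_num) hd)]
  exact_mod_cast Nat.ofDigits_digits 2 n

theorem pvBits_length (n : Nat) (h : n ≠ 0) : (pvBits n).length = Nat.log 2 n + 1 := by
  unfold pvBits
  simp [Nat.length_digits 2 n (by norm_num) h]

-- pvChunks distributes over append when the left part is a whole number of chunks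
theorem pvChunks_append (a b : List Char) (h : a.length % 5 = 0) :
    pvChunks (a ++ b) = pvChunks a ++ pvChunks b := by
  by_cases ha : a = []
  · subst ha
    have : pvChunks ([] : List Char) = [] := by rw [pvChunks]; simp
    simp [this]
  · have h5 : 5 ≤ a.length := by
      have : a.length ≠ 0 := by simpa using ha
      omega
    have hab : ¬ (a ++ b = []) := by simp [ha]
    conv_rhs => rw [pvChunks]
    rw [pvChunks]
    simp only [hab, ha, dite_false]
    rw [List.take_append_of_le_length h5, List.drop_append_of_le_length h5]
    rw [pvChunks_append (a.drop 5) b (by simp [List.length_drop]; omega)]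
    simp
termination_by a.length
decreasing_by
  simp [List.length_drop]
  omega

-- a bit list of length 5*m chunked = the m base-32 digits of its value, MSB first
theorem pvChunks_eq (m : Nat) : ∀ l : List Char, l.length = 5 * m →
    pvChunks l = (pvDigitsLow m (pvVal2 l)).reverse := by
  induction m with
  | zero =>
    intro l hl
    have : l = [] := List.eq_nil_of_length_eq_zero (by omega)
    subst this
    rw [pvChunks]
    simp [pvDigitsLow]
  | succ m ih =>
    intro l hl
    have hsplit : l = l.take (5 * m) ++ l.drop (5 * m) := (List.take_append_drop _ l).symm
    set a := l.take (5 * m) with ha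
    set c := l.drop (5 * m) with hc
    have hal : a.length = 5 * m := by simp [ha]; omega
    have hcl : c.length = 5 := by simp [hc]; omega
    have hrw : pvChunks l = pvChunks a ++ pvChunks c := by
      rw [hsplit]; exact pvChunks_append a c (by omega)
    have hcne : c ≠ [] := by intro h; rw [h] at hcl; simp at hcl
    have hcchunk : pvChunks c = [pvAlpha.getD (pvVal2 c) '0'] := by
      rw [pvChunks]
      simp only [hcne, dite_false]
      have ht : c.take 5 = c := List.take_of_length_le (by omega)
      have hd : c.drop 5 = [] := List.drop_eq_nil_of_le (by omega)
      have hnil : pvChunks ([] : List Char) = [] := by rw [pvChunks]; simp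
      rw [ht, hd, hnil]
    have hval : pvVal2 l = pvVal2 a * 32 + pvVal2 c := by
      conv_lhs => rw [hsplit]
      rw [pvVal2_append, hcl]
      norm_num
    have hclt : pvVal2 c < 32 := by
      have := pvVal2_lt c
      rw [hcl] at this
      norm_num at this
      exact this
    have hmod : pvVal2 l % 32 = pvVal2 c := by omega
    have hdiv : pvVal2 l / 32 = pvVal2 a := by omega
    rw [hrw, hcchunk, ih a hal]
    show _ = (pvAlpha.getD (pvVal2 l % 32) '0' :: pvDigitsLow m (pvVal2 l / 32)).reverse
    rw [List.reverse_cons, hmod, hdiv]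

-- ===== VERDICT =====
theorem encode_custom_alphanumeric_spec : Claim_equal_encode_custom_alphanumeric := by
  intro s _hdom hpre
  unfold Spec_encode_custom_alphanumeric
  unfold Pre_encode_custom_alphanumeric at hpre
  unfold encode_custom_alphanumeric encode_custom_alphanumeric_alt
  cases hp : PySem.Int.ofStrBase? s 16 with
  | none => rfl
  | some z =>
    rw [hp] at hpre
    simp only [Option.getD_some] at hpre
    obtain ⟨n, rfl⟩ : ∃ m : Nat, z = (m : Int) := ⟨z.toNat, (Int.toNat_of_nonneg hpre).symm⟩
    simp only
    by_cases hz : n = 0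
    · subst hz
      have h0 : pvLoopA ((0:Nat):Int) [] = [] := by rw [pvLoopA]; simp
      simp only [Nat.cast_zero] at h0 ⊢
      rw [h0]
      decide
    · have hn0 : ¬ ((n:Int) = 0) := by exact_mod_cast hz
      have hpos : 0 < n := Nat.pos_of_ne_zero hz
      simp only [hn0, if_false]
      rw [pvLoopA_eq n []]
      simp only [List.append_nil, pvRepr_ne_nil n hz, if_false]
      -- A's side: take 7 of the full base-32 representation
      have hsliceA : PySem.List.slice (pvRepr n) none (some 7) = (pvRepr n).take 7 := by
        rw [PySem.List.slice_to _ (by norm_num)]; rfl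
      rw [hsliceA]
      -- B's side
      have htn : (↑n : Int).toNat = n := rfl
      rw [htn]
      set L := (pvBits n).length with hL
      have hLval : L = Nat.log 2 n + 1 := pvBits_length n hz
      set k := (5 - L % 5) % 5 with hk
      set P := List.replicate k '0' ++ pvBits n with hP
      set m := (L + 4) / 5 with hm
      have hPlen : P.length = 5 * m := by
        simp only [hP, List.length_append, List.length_replicate, ← hL]
        omega
      have hPval : pvVal2 P = n := by
        rw [hP, pvVal2_append, pvVal2_replicate_zero, pvBits_val]
        ring
      have hm1 : 1 ≤ m := by omega
      -- bracket: 32^(m-1) ≤ n < 32^m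
      have hub : n < 32 ^ m := by
        calc n < 2 ^ L := by
              rw [hLval]; exact Nat.lt_pow_succ_log_self (by norm_num) n
          _ ≤ 2 ^ (5 * m) := Nat.pow_le_pow_right (by norm_num) (by omega)
          _ = 32 ^ m := by rw [pow_mul]; norm_num
      have hlb : 32 ^ (m - 1) ≤ n := by
        calc 32 ^ (m - 1) = 2 ^ (5 * (m - 1)) := by rw [pow_mul]; norm_num
          _ ≤ 2 ^ (L - 1) := Nat.pow_le_pow_right (by norm_num) (by omega)
          _ ≤ n := by
              rw [hLval]; simpa using Nat.pow_log_le_self 2 hz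
      rw [pvChunks_eq m P hPlen, hPval]
      have hmm : m = (m - 1) + 1 := by omega
      rw [hmm, pvDigitsLow_reverse (m - 1) n hpos hlb (by rw [← hmm]; exact hub)]
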